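-- pv_equiv track=rewrite | github.com/JoaoDaviMNunes/AES_decrypt | aux_decrypt.py | next_key
-- ===== SOURCE A (Python) =====
-- import string
--
-- def next_key(key):
--     # Os 11 primeiros caracteres são conhecidos
--     prefix = key[:11]
--     # Os últimos 5 caracteres são desconhecidos
--     suffix = key[11:]
--
--     # Conjunto de caracteres permitidos: letras maiúsculas, letras minúsculas e dígitos
--     charset = string.ascii_letters + string.digits
--
--     # Converte o sufixo em um número usando a base 62
--     base = len(charset)
--     number = 0
--     for char in suffix:
--         number = number * base + charset.index(char)
--
--     # Incrementa o número
--     number += 1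
--
--     # Converte de volta para a string de sufixo
--     new_suffix = ''
--     while number > 0:
--         new_suffix = charset[number % base] + new_suffix
--         number //= base
--
--     # Garante que o novo sufixo tenha 5 caracteres (preenche com 'a' se necessário)
--     new_suffix = new_suffix.rjust(5, 'a')
--
--     # Retorna a nova chave
--     return prefix + new_suffix
-- ===== SOURCE B (Python) =====
-- import string
--
-- CHARSET = string.ascii_letters + string.digits
--
-- def next_key(key):
--     prefix, suffix = key[:11], key[11:]
--     # per-digit ripple carry instead of forming the full base-62 integer
--     digits = [CHARSET.index(c) for c in suffix]
--     i = len(digits) - 1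
--     carry = 1
--     while carry and i >= 0:
--         if digits[i] == 61:
--             digits[i] = 0
--         else:
--             digits[i] += 1
--             carry = 0
--         i -= 1
--     if carry:
--         digits.insert(0, 1)
--     # canonical form: drop leading zero digits, then zero-pad ('a') to 5
--     while digits[0] == 0:
--         digits.pop(0)
--     new_suffix = ''.join(CHARSET[d] for d in digits).rjust(5, 'a')
--     return prefix + new_suffix
-- ===== Notes on version B (the rewrite author's own statement) =====
-- stated objective: faster
-- what changed: B increments the suffix by ripple carry directly on the per-character base-62 digit list (then strips leading zero digits and pads), instead of A's round trip through one big base-62 integer built by Horner evaluation and decomposed again by repeated divmod, whose big-int arithmetic costs grow quadratically with suffix length.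
-- outside the precondition, e.g. on next_key('aaaaaaaaaaa!a'): A raises ValueError, B raises ValueError
import Mathlib
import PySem

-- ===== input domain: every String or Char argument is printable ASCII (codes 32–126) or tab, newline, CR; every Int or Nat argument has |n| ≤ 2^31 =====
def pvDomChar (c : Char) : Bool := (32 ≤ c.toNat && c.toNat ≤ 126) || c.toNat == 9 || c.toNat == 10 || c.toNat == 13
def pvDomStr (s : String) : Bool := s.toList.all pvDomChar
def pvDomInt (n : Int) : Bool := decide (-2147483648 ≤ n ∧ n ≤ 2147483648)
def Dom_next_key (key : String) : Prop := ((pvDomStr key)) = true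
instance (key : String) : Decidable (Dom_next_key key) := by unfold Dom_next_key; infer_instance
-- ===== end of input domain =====

-- B replaces A's suffix→big-integer→suffix round trip by an in-place ripple-carry
-- increment on the per-character base-62 digit list, avoiding big-integer arithmetic (objective: faster; measured).

-- charset = string.ascii_letters + string.digits
def pvCharset : List Char :=
  ['a', 'b', 'c', 'd', 'e', 'f', 'g', 'h', 'i', 'j', 'k', 'l', 'm', 'n', 'o', 'p', 'q', 'r', 's', 't', 'u', 'v', 'w', 'x', 'y', 'z', 'A', 'B', 'C', 'D', 'E', 'F', 'G', 'H', 'I', 'J', 'K', 'L', 'M', 'N', 'O', 'P', 'Q', 'R', 'S', 'T', 'U', 'V', 'W', 'X', 'Y', 'Z', '0', '1', '2', '3', '4', '5', '6', '7', '8', '9']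

-- ===== PORT A =====
-- A's while-loop 'new_suffix = charset[number % base] + new_suffix; number //= base'
def pvLoopA : Nat → List Char → List Char
  | 0, acc => acc
  | n+1, acc => pvLoopA ((n+1) / 62) (pvCharset.getD ((n+1) % 62) 'a' :: acc)
  decreasing_by exact Nat.div_lt_self (Nat.succ_pos n) (by norm_num)

def next_key (key : String) : String :=
  let pre := key.toList.take 11
  let suffix := key.toList.drop 11
  -- charset.index raises on a char outside charset; Pre_ excludes that, where idxOf is exact
  let number := suffix.foldl (fun n c => n * 62 + pvCharset.idxOf c) 0
  let ns := pvLoopA (number + 1) []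
  let ns2 := List.replicate (5 - ns.length) 'a' ++ ns
  String.mk (pre ++ ns2)

-- ===== PORT B =====
-- B's right-to-left carry loop, written over the reversed (least-significant-first) digit list
def pvIncRev : List Nat → List Nat
  | [] => [1]
  | d :: t => if d = 61 then 0 :: pvIncRev t else (d + 1) :: t

def next_key_alt (key : String) : String :=
  let pre := key.toList.take 11
  let suffix := key.toList.drop 11
  let digits := suffix.map (fun c => pvCharset.idxOf c)
  let digits2 := (pvIncRev digits.reverse).reverse
  let digits3 := digits2.dropWhile (fun d => d == 0)
  let ns := digits3.map (fun d => pvCharset.getD d 'a')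
  let ns2 := List.replicate (5 - ns.length) 'a' ++ ns
  String.mk (pre ++ ns2)

-- ===== PRECONDITION & SPEC =====
-- Pre_ excludes exactly the keys whose suffix (chars after index 11) contains a
-- character outside [a-zA-Z0-9]: there A's charset.index raises ValueError.
def Pre_next_key (key : String) : Prop :=
  ((key.toList.drop 11).all (fun c => c ∈ pvCharset)) = true
instance (key : String) : Decidable (Pre_next_key key) := by unfold Pre_next_key; infer_instance

def pvWitness_next_key : String := "aaaaaaaaaaab"

def Spec_next_key (key : String) (out : String) : Prop := out = next_key_alt key
instance (key : String) (out : String) : Decidable (Spec_next_key key out) := by unfold Spec_next_key; infer_instance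

-- ===== CLAIM (what is proved, stated in full; the proofs are below) =====
def Claim_equal_next_key : Prop := ∀ (key : String), Dom_next_key key → Pre_next_key key → Spec_next_key key (next_key key)

-- ===== LEMMAS AND PROOFS =====

-- value of a least-significant-first digit list
def pvValRev : List Nat → Nat
  | [] => 0
  | d :: t => d + 62 * pvValRev t

theorem pvFoldl_eq_valRev (l : List Nat) :
    l.foldl (fun n d => n * 62 + d) 0 = pvValRev l.reverse := by
  induction l using List.reverseRecOn with
  | nil => simp [pvValRev]
  | append_singleton t d ih =>
      simp [List.foldl_append, ih, pvValRev]
      ring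

theorem pvValRev_incRev (l : List Nat) : pvValRev (pvIncRev l) = pvValRev l + 1 := by
  induction l with
  | nil => simp [pvIncRev, pvValRev]
  | cons d t ih =>
      by_cases h : d = 61
      · simp [pvIncRev, h, pvValRev, ih]; ring
      · simp [pvIncRev, h, pvValRev]; ring

theorem pvIncRev_lt (l : List Nat) (h : ∀ d ∈ l, d < 62) :
    ∀ d ∈ pvIncRev l, d < 62 := by
  induction l with
  | nil => simp [pvIncRev]
  | cons d t ih =>
      by_cases hd : d = 61
      · simp only [pvIncRev, hd, if_true, List.mem_cons]
        intro x hx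
        rcases hx with hx | hx
        · omega
        · exact ih (fun y hy => h y (List.mem_cons_of_mem _ hy)) x hx
      · simp only [pvIncRev, hd, if_false, List.mem_cons]
        intro x hx
        rcases hx with hx | hx
        · have := h d (List.mem_cons_self ..); omega
        · exact h x (List.mem_cons_of_mem _ hx)

theorem pvValRev_zero (l : List Nat) (h : pvValRev l = 0) : ∀ d ∈ l, d = 0 := by
  induction l with
  | nil => simp
  | cons d t ih =>
      simp only [pvValRev] at h
      simp only [List.mem_cons]
      intro x hx
      rcases hx with hx | hx
      · omega
      · exact ih (by omega) x hx

theorem pvValRev_of_zeros (l : List Nat) (h : ∀ d ∈ l, d = 0) : pvValRev l = 0 := by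
  induction l with
  | nil => simp [pvValRev]
  | cons d t ih =>
      simp only [pvValRev]
      have := h d (List.mem_cons_self ..)
      have := ih (fun x hx => h x (List.mem_cons_of_mem _ hx))
      omega

theorem pvLoopA_step (n : Nat) (hn : n ≠ 0) (acc : List Char) :
    pvLoopA n acc = pvLoopA (n / 62) (pvCharset.getD (n % 62) 'a' :: acc) := by
  rcases Nat.exists_eq_succ_of_ne_zero hn with ⟨m, rfl⟩
  rw [pvLoopA]

-- A's conversion loop produces exactly the leading-zero-stripped reverse of the digit list
theorem pvLoopA_eq (l : List Nat) (hlt : ∀ d ∈ l, d < 62) (acc : List Char) :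
    pvLoopA (pvValRev l) acc
      = (l.reverse.dropWhile (fun d => d == 0)).map (fun d => pvCharset.getD d 'a') ++ acc := by
  induction l generalizing acc with
  | nil => simp [pvValRev, pvLoopA]
  | cons d t ih =>
      have hd : d < 62 := hlt d (List.mem_cons_self ..)
      have ht : ∀ x ∈ t, x < 62 := fun x hx => hlt x (List.mem_cons_of_mem _ hx)
      by_cases hz : d + 62 * pvValRev t = 0
      · have hall : ∀ x ∈ t.reverse ++ [d], x = 0 := by
          intro x hx
          rcases List.mem_append.mp hx with hx | hx
          · exact pvValRev_zero t (by omega) x (List.mem_reverse.mp hx)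
          · simp at hx; omega
        have hdrop : (t.reverse ++ [d]).dropWhile (fun d => d == 0) = [] := by
          apply List.dropWhile_eq_nil_iff.mpr
          intro x hx; simp [hall x hx]
        simp only [pvValRev]
        rw [hz]
        simp [pvLoopA, List.reverse_cons, hdrop]
      · -- value positive: one loop step peels off digit d
        have hmod : (d + 62 * pvValRev t) % 62 = d := by omega
        have hdiv : (d + 62 * pvValRev t) / 62 = pvValRev t := by omega
        simp only [pvValRev]
        rw [pvLoopA_step _ hz, hmod, hdiv, ih ht]
        by_cases hv : pvValRev t = 0
        · have h1 : t.reverse.dropWhile (fun d => d == 0) = [] := by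
            apply List.dropWhile_eq_nil_iff.mpr
            intro x hx
            simp [pvValRev_zero t hv x (List.mem_reverse.mp hx)]
          have hd0 : d ≠ 0 := by omega
          have h2 : ((d :: t).reverse).dropWhile (fun d => d == 0) = [d] := by
            rw [List.reverse_cons, List.dropWhile_append, h1]
            simp [hd0]
          rw [h1, h2]; simp
        · have h1 : t.reverse.dropWhile (fun d => d == 0) ≠ [] := by
            intro hnil
            apply hv
            apply pvValRev_of_zeros
            intro x hx
            have := List.dropWhile_eq_nil_iff.mp hnil x (List.mem_reverse.mpr hx)
            simpa using this
          have h2 : ((d :: t).reverse).dropWhile (fun d => d == 0)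
              = t.reverse.dropWhile (fun d => d == 0) ++ [d] := by
            rw [List.reverse_cons, List.dropWhile_append]
            simp [List.isEmpty_iff, h1]
          rw [h2]; simp

-- ===== VERDICT (by name: the statement is the Claim_ definition above) =====
theorem next_key_spec : Claim_equal_next_key := by
  intro key _hdom hpre0
  unfold Pre_next_key at hpre0
  have hpre : ∀ c ∈ key.toList.drop 11, c ∈ pvCharset := by
    intro c hc
    have := List.all_eq_true.mp hpre0 c hc
    simpa using this
  unfold Spec_next_key next_key next_key_alt
  set suffix := key.toList.drop 11 with hs
  have hlt : ∀ d ∈ suffix.map (fun c => pvCharset.idxOf c), d < 62 := by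
    intro d hd
    rcases List.mem_map.mp hd with ⟨c, hc, rfl⟩
    have := List.idxOf_lt_length_of_mem (hpre c hc)
    simpa [pvCharset] using this
  have hfold : suffix.foldl (fun n c => n * 62 + pvCharset.idxOf c) 0
      = pvValRev ((suffix.map (fun c => pvCharset.idxOf c)).reverse) := by
    rw [← pvFoldl_eq_valRev, List.foldl_map]
  have hlt' : ∀ d ∈ pvIncRev (suffix.map (fun c => pvCharset.idxOf c)).reverse, d < 62 :=
    pvIncRev_lt _ (by intro d hd; exact hlt d (List.mem_reverse.mp hd))
  have hmain := pvLoopA_eq (pvIncRev (suffix.map (fun c => pvCharset.idxOf c)).reverse) hlt' []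
  rw [pvValRev_incRev, ← hfold] at hmain
  simp only [hmain]
  simp
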